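-- pv_equiv track=rewrite | github.com/MrAMS/Verilator-Coverview-Converter | src/verilator_coverage_with_coverview/path_alias.py | apply_wildcard_template
-- ===== SOURCE A (Python) =====
-- def apply_wildcard_template(template: str, values: list[str]) -> str | None:
--     """Replace '*' in template with captured wildcard values in order."""
--     output: list[str] = []
--     value_idx = 0
--     for char in template:
--         if char == "*":
--             if value_idx >= len(values):
--                 return None
--             output.append(values[value_idx])
--             value_idx += 1
--         else:
--             output.append(char)
--     return "".join(output)
-- ===== SOURCE B (Python) =====
-- def apply_wildcard_template(template: str, values: list[str]) -> str | None:
--     """Replace '*' in template with captured wildcard values in order."""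
--     parts = template.split("*")
--     if len(values) < len(parts) - 1:
--         return None
--     out = [parts[0]]
--     for seg, val in zip(parts[1:], values):
--         out.append(val)
--         out.append(seg)
--     return "".join(out)
-- ===== Notes on version B (the rewrite author's own statement) =====
-- stated objective: alternative
-- what changed: B splits the template on '*' once, checks the star count against len(values) up front, and rebuilds the result by interleaving the split segments with the values, instead of A's per-character loop with an index and early return.
import Mathlib
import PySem

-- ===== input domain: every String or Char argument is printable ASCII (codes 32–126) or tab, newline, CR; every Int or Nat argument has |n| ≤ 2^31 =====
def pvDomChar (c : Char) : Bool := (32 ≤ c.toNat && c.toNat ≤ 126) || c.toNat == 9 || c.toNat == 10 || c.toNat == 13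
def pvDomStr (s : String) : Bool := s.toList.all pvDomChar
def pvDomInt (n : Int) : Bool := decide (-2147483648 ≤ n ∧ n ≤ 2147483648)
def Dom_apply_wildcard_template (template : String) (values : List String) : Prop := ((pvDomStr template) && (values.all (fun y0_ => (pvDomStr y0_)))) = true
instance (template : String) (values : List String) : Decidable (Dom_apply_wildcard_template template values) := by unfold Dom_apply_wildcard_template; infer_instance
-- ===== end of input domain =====

-- B rebuilds the string by splitting the template on '*' once and interleaving the
-- segments with the values (count checked up front), instead of A's per-character loop.

-- ===== PORT A =====
-- the 'for char in template' loop: out is the output list (pieces as char lists), idx = value_idx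
def pvLoopA : List Char → List String → Nat → List (List Char) → Option (List Char)
  | [], _, _, out => some out.flatten                    -- "".join(output)
  | c :: rest, values, idx, out =>
    if c = '*' then
      if values.length ≤ idx then none                   -- value_idx >= len(values): return None
      else pvLoopA rest values (idx + 1) (out ++ [(values.getD idx "").toList])
    else pvLoopA rest values idx (out ++ [[c]])

def apply_wildcard_template (template : String) (values : List String) : Option String :=
  (pvLoopA template.toList values 0 []).map String.ofList

-- ===== PORT B =====
-- interleave the split segments parts[0], values[0], parts[1], values[1], …  (surplus values ignored)
def pvInterleaveB (parts : List (List Char)) (values : List String) : Option String :=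
  if values.length < parts.length - 1 then none
  else
    some (String.ofList ((List.zip (parts.drop 1) values).foldl
      (fun acc pv => acc ++ pv.2.toList ++ pv.1) (parts.headD [])))

def apply_wildcard_template_alt (template : String) (values : List String) : Option String :=
  pvInterleaveB (PySem.Chars.splitOn template.toList ['*']) values    -- template.split("*")

-- ===== PRECONDITION & SPEC =====
def Spec_apply_wildcard_template (template : String) (values : List String) (out : Option String) : Prop := out = apply_wildcard_template_alt template values
instance (template : String) (values : List String) (out : Option String) : Decidable (Spec_apply_wildcard_template template values out) := by unfold Spec_apply_wildcard_template; infer_instance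

-- ===== CLAIM (what is proved, stated in full; the proofs are below) =====
def Claim_equal_apply_wildcard_template : Prop := ∀ (template : String) (values : List String), Dom_apply_wildcard_template template values → Spec_apply_wildcard_template template values (apply_wildcard_template template values)

-- ===== LEMMAS AND PROOFS =====

-- proof-side spec: structural recursion consuming template chars and remaining values together
def pvF : List Char → List String → Option (List Char)
  | [], _ => some []
  | c :: rest, vs =>
    if c = '*' then
      match vs with
      | [] => none
      | v :: vs' => (pvF rest vs').map (fun r => v.toList ++ r)
    else (pvF rest vs).map (fun r => c :: r)

lemma pvF_star_nil (rest : List Char) : pvF ('*' :: rest) [] = none := by simp [pvF]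
lemma pvF_star_cons (rest : List Char) (v : String) (vs : List String) :
    pvF ('*' :: rest) (v :: vs) = (pvF rest vs).map (fun r => v.toList ++ r) := by simp [pvF]
lemma pvF_char (c : Char) (rest : List Char) (vs : List String) (hc : c ≠ '*') :
    pvF (c :: rest) vs = (pvF rest vs).map (fun r => c :: r) := by simp [pvF, hc]

-- structural characterisation of splitOn on the single-char separator '*'
def pvSplit : List Char → List (List Char)
  | [] => [[]]
  | c :: rest => if c = '*' then [] :: pvSplit rest else (pvSplit rest).modifyHead (c :: ·)

lemma pvSplit_star (rest : List Char) : pvSplit ('*' :: rest) = [] :: pvSplit rest := by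
  simp [pvSplit]

lemma pvSplit_char (c : Char) (rest : List Char) (hc : c ≠ '*') :
    pvSplit (c :: rest) = (pvSplit rest).modifyHead (c :: ·) := by simp [pvSplit, hc]

lemma pvSplit_ne_nil (cs : List Char) : pvSplit cs ≠ [] := by
  cases cs with
  | nil => simp [pvSplit]
  | cons c rest =>
    simp only [pvSplit]
    split_ifs
    · simp
    · cases h : pvSplit rest with
      | nil => exact absurd h (pvSplit_ne_nil rest)
      | cons a t => simp

lemma pv_go (fuel : Nat) (l cur : List Char) (accs : List (List Char))
    (h : l.length < fuel) :
    PySem.Chars.splitOn.go ['*'] fuel l cur accs = accs.reverse ++ (pvSplit l).modifyHead (cur.reverse ++ ·) := by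
  induction fuel generalizing l cur accs with
  | zero => omega
  | succ fuel ih =>
    cases l with
    | nil => simp [PySem.Chars.splitOn.go, pvSplit]
    | cons c rest =>
      by_cases hc : c = '*'
      · subst hc
        have hpre : List.isPrefixOf ['*'] ('*' :: rest) = true := by
          simp [List.isPrefixOf]
        rw [PySem.Chars.splitOn.go]
        simp only [hpre, if_pos]
        have hdrop : List.drop (['*'] : List Char).length ('*' :: rest) = rest := by simp
        rw [hdrop, ih rest [] (cur.reverse :: accs) (by simpa using Nat.lt_of_succ_lt_succ h)]
        rw [pvSplit_star]
        cases hs : pvSplit rest with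
        | nil => exact absurd hs (pvSplit_ne_nil rest)
        | cons a t => simp
      · have hpre : List.isPrefixOf ['*'] (c :: rest) = false := by
          simp only [List.isPrefixOf, Bool.and_eq_false_iff]
          exact Or.inl (by simpa using Ne.symm hc)
        rw [PySem.Chars.splitOn.go]
        simp only [hpre]
        rw [if_neg (by simp)]
        rw [ih rest (c :: cur) accs (by simpa using Nat.lt_of_succ_lt_succ h)]
        rw [pvSplit_char c rest hc]
        cases hsp : pvSplit rest with
        | nil => exact absurd hsp (pvSplit_ne_nil rest)
        | cons a t => simp

lemma pv_splitOn_eq (cs : List Char) : PySem.Chars.splitOn cs ['*'] = pvSplit cs := by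
  unfold PySem.Chars.splitOn
  rw [pv_go (cs.length + 1) cs [] [] (by omega)]
  cases h : pvSplit cs with
  | nil => exact absurd h (pvSplit_ne_nil cs)
  | cons a t => simp

-- A's loop equals pvF on the still-unconsumed values, prefixed by the flattened accumulator
lemma pv_loopA_eq (cs : List Char) (values : List String) (idx : Nat) (out : List (List Char)) :
    pvLoopA cs values idx out = (pvF cs (values.drop idx)).map (fun r => out.flatten ++ r) := by
  induction cs generalizing idx out with
  | nil => simp [pvLoopA, pvF]
  | cons c rest ih =>
    by_cases hc : c = '*'
    · subst hc
      simp only [pvLoopA, if_pos rfl]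
      by_cases hge : values.length ≤ idx
      · rw [if_pos hge]
        have hnil : values.drop idx = [] := List.drop_eq_nil_of_le hge
        rw [hnil, pvF_star_nil]
        rfl
      · rw [if_neg hge]
        have hlt : idx < values.length := by omega
        have hdrop : values.drop idx = values[idx] :: values.drop (idx + 1) :=
          List.drop_eq_getElem_cons hlt
        have hgetD : values.getD idx "" = values[idx] := List.getD_eq_getElem values "" hlt
        rw [ih (idx + 1) (out ++ [(values.getD idx "").toList]), hdrop, pvF_star_cons, hgetD]
        cases pvF rest (values.drop (idx + 1)) <;> simp
    · simp only [pvLoopA, if_neg hc]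
      rw [ih idx (out ++ [[c]]), pvF_char c rest _ hc]
      cases pvF rest (values.drop idx) <;> simp

-- pull a prefix of the accumulator out of B's interleaving fold
lemma pv_foldl_prefix (l : List (List Char × String)) (a b : List Char) :
    l.foldl (fun acc pv => acc ++ pv.2.toList ++ pv.1) (a ++ b)
      = a ++ l.foldl (fun acc pv => acc ++ pv.2.toList ++ pv.1) b := by
  induction l generalizing b with
  | nil => simp
  | cons p t ih => simp [List.foldl_cons, ← ih]

-- B's guarded interleaving over the split equals pvF (up to String.ofList)
lemma pv_alt_eq (cs : List Char) (values : List String) :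
    pvInterleaveB (pvSplit cs) values = (pvF cs values).map String.ofList := by
  induction cs generalizing values with
  | nil => simp [pvSplit, pvF, pvInterleaveB]
  | cons c rest ih =>
    have hne := pvSplit_ne_nil rest
    obtain ⟨h, t, hsp⟩ : ∃ h t, pvSplit rest = h :: t := by
      cases hs : pvSplit rest with
      | nil => exact absurd hs hne
      | cons a b => exact ⟨a, b, rfl⟩
    by_cases hc : c = '*'
    · subst hc
      rw [pvSplit_star]
      cases values with
      | nil =>
        rw [pvF_star_nil]
        unfold pvInterleaveB
        rw [if_pos (by simp [hsp])]
        rfl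
      | cons v vs =>
        rw [pvF_star_cons]
        have := ih vs
        unfold pvInterleaveB at this ⊢
        by_cases hguard : vs.length < (pvSplit rest).length - 1
        · rw [if_pos (by simp [hsp] at hguard ⊢; omega)]
          rw [if_pos hguard] at this
          cases hpf : pvF rest vs with
          | none => simp
          | some r => rw [hpf] at this; exact absurd this (by simp)
        · rw [if_neg (by simp [hsp] at hguard ⊢; omega)]
          rw [if_neg hguard] at this
          cases hpf : pvF rest vs with
          | none => rw [hpf] at this; simp at this
          | some r =>
            rw [hpf] at this
            simp only [Option.map_some, Option.some.injEq] at this ⊢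
            rw [hsp] at this ⊢
            simp only [List.drop_succ_cons, List.drop_zero, List.headD_cons, List.zip_cons_cons,
              List.foldl_cons, List.nil_append] at this ⊢
            have hl : List.foldl (fun acc pv => acc ++ pv.2.toList ++ pv.1) h (t.zip vs) = r := by
              have := congrArg String.toList this
              simpa using this
            rw [pv_foldl_prefix (t.zip vs) v.toList h, hl]
    · rw [pvSplit_char c rest hc, pvF_char c rest _ hc, hsp, List.modifyHead_cons]
      have := ih values
      rw [hsp] at this
      unfold pvInterleaveB at this ⊢
      by_cases hguard : values.length < ((h :: t) : List (List Char)).length - 1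
      · rw [if_pos (by simpa using hguard)]
        rw [if_pos hguard] at this
        cases hpf : pvF rest values with
        | none => simp [hpf]
        | some r => rw [hpf] at this; simp at this
      · rw [if_neg (by simpa using hguard)]
        rw [if_neg hguard] at this
        cases hpf : pvF rest values with
        | none => rw [hpf] at this; simp at this
        | some r =>
          rw [hpf] at this
          simp only [Option.map_some, Option.some.injEq] at this ⊢
          simp only [List.drop_succ_cons, List.drop_zero, List.headD_cons] at this ⊢
          have hl : List.foldl (fun acc pv => acc ++ pv.2.toList ++ pv.1) h (t.zip values) = r := by
            have := congrArg String.toList this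
            simpa using this
          have hpre := pv_foldl_prefix (t.zip values) [c] h
          rw [show ((c :: h) : List Char) = [c] ++ h from rfl, hpre, hl]
          simp

-- ===== VERDICT (by name: the statement is the Claim_ definition above) =====
theorem apply_wildcard_template_spec : Claim_equal_apply_wildcard_template := by
  intro template values _
  unfold Spec_apply_wildcard_template apply_wildcard_template apply_wildcard_template_alt
  rw [pv_splitOn_eq, pv_alt_eq, pv_loopA_eq]
  simp
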